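-- pv_equiv track=rewrite | github.com/not-a-bank/open-banking-tracker-data | scrapers/flinks_scraper.py | find_matching_provider
-- ===== SOURCE A (Python) =====
-- from typing import Optional
--
-- def find_matching_provider(bank_id: str, existing_ids: set[str]) -> Optional[str]:
--     """
--     Find an existing provider ID that matches the given bank ID.
--
--     Args:
--         bank_id: The slugified bank ID
--         existing_ids: Set of existing provider IDs
--
--     Returns:
--         The matching existing provider ID, or None if no match
--     """
--     # Exact match
--     if bank_id in existing_ids:
--         return bank_id
--
--     # Common suffixes to try removing/adding
--     suffixes = ['-bank', '-financial', '-credit-union', '-savings', '-trust', '-usa', '-canada']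
--     country_suffixes = ['-ca', '-us']
--
--     # Try removing country suffixes first
--     for suffix in country_suffixes:
--         if bank_id.endswith(suffix):
--             base_id = bank_id[:-len(suffix)]
--             if base_id in existing_ids:
--                 return base_id
--
--     # Try removing common suffixes
--     for suffix in suffixes:
--         if bank_id.endswith(suffix):
--             base_id = bank_id[:-len(suffix)]
--             if base_id in existing_ids:
--                 return base_id
--
--     # Try adding suffixes
--     for suffix in suffixes:
--         if f"{bank_id}{suffix}" in existing_ids:
--             return f"{bank_id}{suffix}"
--
--     # Try common name variations
--     variations = [
--         bank_id.replace('-and-', '-'),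
--         bank_id.replace('-', ''),
--         bank_id.replace('bank-of-', ''),
--     ]
--     for var in variations:
--         if var in existing_ids:
--             return var
--
--     return None
-- ===== SOURCE B (Python) =====
-- from typing import Optional
--
-- def find_matching_provider(bank_id: str, existing_ids: set[str]) -> Optional[str]:
--     """Inverted scan: instead of testing candidate variants against the set one by
--     one, rank every EXISTING provider id by the priority of the variant it equals
--     (first index in the ordered candidate list) and return the best-ranked one."""
--     suffixes = ['-bank', '-financial', '-credit-union', '-savings', '-trust', '-usa', '-canada']
--     country_suffixes = ['-ca', '-us']
--     candidates = [bank_id]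
--     candidates += [bank_id[:-len(s)] for s in country_suffixes if bank_id.endswith(s)]
--     candidates += [bank_id[:-len(s)] for s in suffixes if bank_id.endswith(s)]
--     candidates += [bank_id + s for s in suffixes]
--     candidates += [bank_id.replace('-and-', '-'),
--                    bank_id.replace('-', ''),
--                    bank_id.replace('bank-of-', '')]
--     best = None
--     for provider in existing_ids:
--         if provider in candidates:
--             rank = candidates.index(provider)
--             if best is None or rank < best:
--                 best = rank
--     return candidates[best] if best is not None else None
-- ===== Notes on version B (the rewrite author's own statement) =====
-- stated objective: alternative
-- what changed: B inverts the scan: instead of A's four interleaved loops testing candidate variants against the set with early return, B ranks each EXISTING provider id by the priority index of the candidate variant it equals and returns the minimum-ranked one (argmin over the corpus instead of first-hit over candidates).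
import Mathlib
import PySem

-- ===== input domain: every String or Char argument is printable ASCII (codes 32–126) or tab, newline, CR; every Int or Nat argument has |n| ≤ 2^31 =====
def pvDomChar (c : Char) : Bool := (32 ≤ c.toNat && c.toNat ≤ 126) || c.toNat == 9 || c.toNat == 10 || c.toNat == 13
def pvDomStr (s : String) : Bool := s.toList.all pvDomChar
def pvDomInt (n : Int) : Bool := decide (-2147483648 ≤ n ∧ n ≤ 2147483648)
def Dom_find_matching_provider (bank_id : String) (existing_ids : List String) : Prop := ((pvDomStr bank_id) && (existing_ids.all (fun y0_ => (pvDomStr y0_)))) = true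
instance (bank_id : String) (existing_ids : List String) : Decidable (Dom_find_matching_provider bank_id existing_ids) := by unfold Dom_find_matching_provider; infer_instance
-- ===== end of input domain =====

-- B inverts the scan: it ranks every existing provider id by the priority index of the
-- candidate variant it equals and returns the minimum-ranked one, instead of A's four
-- candidate-testing loops with early return; objective: alternative (same result, same order).

-- ===== PORT A =====
-- loop "for suffix in …: if bank_id.endswith(suffix): … if base_id in existing_ids: return base_id"
def fmpRemoveLoop (bank_id : String) (existing_ids : List String) : List String → Option String
  | [] => none
  | s :: rest =>
    if PySem.Str.endswith bank_id s then
      let base_id := PySem.Str.slice bank_id none (some (-(PySem.Str.len s : Int)))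
      if PySem.Set.contains existing_ids base_id then some base_id
      else fmpRemoveLoop bank_id existing_ids rest
    else fmpRemoveLoop bank_id existing_ids rest

-- loop "for suffix in suffixes: if f\"{bank_id}{suffix}\" in existing_ids: return …"
def fmpAddLoop (bank_id : String) (existing_ids : List String) : List String → Option String
  | [] => none
  | s :: rest =>
    if PySem.Set.contains existing_ids (PySem.Str.join "" [bank_id, s]) then
      some (PySem.Str.join "" [bank_id, s])
    else fmpAddLoop bank_id existing_ids rest

-- loop "for var in variations: if var in existing_ids: return var"
def fmpVarLoop (existing_ids : List String) : List String → Option String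
  | [] => none
  | v :: rest =>
    if PySem.Set.contains existing_ids v then some v else fmpVarLoop existing_ids rest

def find_matching_provider (bank_id : String) (existing_ids : List String) : Option String :=
  if PySem.Set.contains existing_ids bank_id then some bank_id
  else
    let suffixes := ["-bank", "-financial", "-credit-union", "-savings", "-trust", "-usa", "-canada"]
    let country_suffixes := ["-ca", "-us"]
    match fmpRemoveLoop bank_id existing_ids country_suffixes with
    | some r => some r
    | none =>
      match fmpRemoveLoop bank_id existing_ids suffixes with
      | some r => some r
      | none =>
        match fmpAddLoop bank_id existing_ids suffixes with
        | some r => some r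
        | none =>
          fmpVarLoop existing_ids
            [PySem.Str.replace bank_id "-and-" "-",
             PySem.Str.replace bank_id "-" "",
             PySem.Str.replace bank_id "bank-of-" ""]

-- ===== PORT B =====
-- bank_id[:-len(s)]
def fmpStrip (bank_id s : String) : String :=
  PySem.Str.slice bank_id none (some (-(PySem.Str.len s : Int)))

def find_matching_provider_alt (bank_id : String) (existing_ids : List String) : Option String :=
  let suffixes := ["-bank", "-financial", "-credit-union", "-savings", "-trust", "-usa", "-canada"]
  let country_suffixes := ["-ca", "-us"]
  let candidates :=
    [bank_id]
    ++ country_suffixes.filterMap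
        (fun s => if PySem.Str.endswith bank_id s then some (fmpStrip bank_id s) else none)
    ++ suffixes.filterMap
        (fun s => if PySem.Str.endswith bank_id s then some (fmpStrip bank_id s) else none)
    ++ suffixes.map (fun s => PySem.Str.join "" [bank_id, s])
    ++ [PySem.Str.replace bank_id "-and-" "-",
        PySem.Str.replace bank_id "-" "",
        PySem.Str.replace bank_id "bank-of-" ""]
  -- "for provider in existing_ids: if provider in candidates: rank = candidates.index(provider); …"
  -- (`provider in candidates` + `candidates.index(provider)` together are exactly index?'s some case)
  let best : Option Nat := existing_ids.foldl
    (fun best provider =>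
      match PySem.List.index? candidates provider with
      | none => best
      | some rank =>
        match best with
        | none => some rank
        | some b => if rank < b then some rank else some b)
    none
  -- "return candidates[best] if best is not None else None"
  best.bind (fun b => PySem.List.pyGet? candidates (b : Int))

-- ===== PRECONDITION & SPEC =====
def Spec_find_matching_provider (bank_id : String) (existing_ids : List String) (out : Option String) : Prop := out = find_matching_provider_alt bank_id existing_ids
instance (bank_id : String) (existing_ids : List String) (out : Option String) : Decidable (Spec_find_matching_provider bank_id existing_ids out) := by unfold Spec_find_matching_provider; infer_instance

-- ===== CLAIM (what is proved, stated in full; the proofs are below) =====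
def Claim_equal_find_matching_provider : Prop := ∀ (bank_id : String) (existing_ids : List String), Dom_find_matching_provider bank_id existing_ids → Spec_find_matching_provider bank_id existing_ids (find_matching_provider bank_id existing_ids)

-- ===== LEMMAS AND PROOFS =====

-- A's three loop shapes are first-hit scans of their candidate groups
theorem fmpRemoveLoop_eq (bank_id : String) (existing_ids : List String) (l : List String) :
    fmpRemoveLoop bank_id existing_ids l =
      (l.filterMap
        (fun s => if PySem.Str.endswith bank_id s then some (fmpStrip bank_id s) else none)).find?
        (fun c => PySem.Set.contains existing_ids c) := by
  induction l with
  | nil => rfl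
  | cons s rest ih =>
    unfold fmpRemoveLoop
    rw [List.filterMap_cons]
    by_cases h : PySem.Str.endswith bank_id s = true
    · rw [if_pos h, if_pos h, List.find?_cons]
      by_cases hc :
          PySem.Set.contains existing_ids
            (PySem.Str.slice bank_id none (some (-(PySem.Str.len s : Int)))) = true
      · simp only [fmpStrip] at hc ⊢
        rw [if_pos hc, hc]
      · simp only [fmpStrip] at hc ⊢
        rw [if_neg hc, ih]
        simp only [eq_false_of_ne_true hc, fmpStrip]
    · rw [if_neg h, if_neg h, ih]

theorem fmpAddLoop_eq (bank_id : String) (existing_ids : List String) (l : List String) :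
    fmpAddLoop bank_id existing_ids l =
      (l.map (fun s => PySem.Str.join "" [bank_id, s])).find?
        (fun c => PySem.Set.contains existing_ids c) := by
  induction l with
  | nil => rfl
  | cons s rest ih =>
    unfold fmpAddLoop
    rw [List.map_cons, List.find?_cons, ih]
    by_cases hc : PySem.Set.contains existing_ids (PySem.Str.join "" [bank_id, s]) = true
    · rw [if_pos hc, hc]
    · rw [if_neg hc]
      simp only [eq_false_of_ne_true hc]

theorem fmpVarLoop_eq (existing_ids : List String) (l : List String) :
    fmpVarLoop existing_ids l = l.find? (fun c => PySem.Set.contains existing_ids c) := by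
  induction l with
  | nil => rfl
  | cons v rest ih =>
    unfold fmpVarLoop
    rw [List.find?_cons, ih]
    by_cases hc : PySem.Set.contains existing_ids v = true
    · rw [if_pos hc, hc]
    · rw [if_neg hc]
      simp only [eq_false_of_ne_true hc]

-- A as one first-hit scan of the full ordered candidate list
theorem fmpA_find (bank_id : String) (existing_ids : List String) :
    find_matching_provider bank_id existing_ids =
      (([bank_id]
        ++ ["-ca", "-us"].filterMap
            (fun s => if PySem.Str.endswith bank_id s then some (fmpStrip bank_id s) else none)
        ++ ["-bank", "-financial", "-credit-union", "-savings", "-trust", "-usa", "-canada"].filterMap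
            (fun s => if PySem.Str.endswith bank_id s then some (fmpStrip bank_id s) else none)
        ++ ["-bank", "-financial", "-credit-union", "-savings", "-trust", "-usa", "-canada"].map
            (fun s => PySem.Str.join "" [bank_id, s])
        ++ [PySem.Str.replace bank_id "-and-" "-",
            PySem.Str.replace bank_id "-" "",
            PySem.Str.replace bank_id "bank-of-" ""]).find?
        (fun c => PySem.Set.contains existing_ids c)) := by
  simp only [find_matching_provider]
  rw [fmpRemoveLoop_eq, fmpRemoveLoop_eq, fmpAddLoop_eq, fmpVarLoop_eq,
      List.find?_append, List.find?_append, List.find?_append, List.find?_append]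
  simp only [List.find?_cons, List.find?_nil]
  by_cases hb : PySem.Set.contains existing_ids bank_id = true
  · rw [if_pos hb, hb]
    simp [Option.or]
  · rw [if_neg hb]
    simp only [eq_false_of_ne_true hb, Option.none_or]
    set c1 := List.find? (fun c => PySem.Set.contains existing_ids c)
      (List.filterMap
        (fun s => if PySem.Str.endswith bank_id s = true then some (fmpStrip bank_id s) else none)
        ["-ca", "-us"]) with hc1
    set c2 := List.find? (fun c => PySem.Set.contains existing_ids c)
      (List.filterMap
        (fun s => if PySem.Str.endswith bank_id s = true then some (fmpStrip bank_id s) else none)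
        ["-bank", "-financial", "-credit-union", "-savings", "-trust", "-usa", "-canada"]) with hc2
    set c3 := List.find? (fun c => PySem.Set.contains existing_ids c)
      (List.map (fun s => PySem.Str.join "" [bank_id, s])
        ["-bank", "-financial", "-credit-union", "-savings", "-trust", "-usa", "-canada"]) with hc3
    cases c1 <;> cases c2 <;> cases c3 <;> simp [Option.or]

-- option-min combiner describing B's accumulator
def fmpOmin : Option Nat → Option Nat → Option Nat
  | none, b => b
  | some a, none => some a
  | some a, some b => some (min a b)

theorem fmpOmin_assoc (a b c : Option Nat) :
    fmpOmin (fmpOmin a b) c = fmpOmin a (fmpOmin b c) := by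
  cases a <;> cases b <;> cases c <;> simp [fmpOmin, Nat.min_assoc]

-- the min-fold restarted from accumulator b
theorem fmpFold_start (xs : List Nat) (b : Option Nat) :
    xs.foldl (fun m r => fmpOmin m (some r)) b
      = fmpOmin b (xs.foldl (fun m r => fmpOmin m (some r)) none) := by
  induction xs generalizing b with
  | nil => cases b <;> rfl
  | cons x xs ih =>
    rw [List.foldl_cons, List.foldl_cons, ih, ih (fmpOmin none (some x)), ← fmpOmin_assoc]
    rfl

-- B's fold computes the option-min of the ranks of the matched existing ids
theorem fmpFold_min (cs : List String) (l : List String) (b : Option Nat) :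
    l.foldl
      (fun best provider =>
        match PySem.List.index? cs provider with
        | none => best
        | some rank =>
          match best with
          | none => some rank
          | some b => if rank < b then some rank else some b)
      b
    = fmpOmin b ((l.filterMap (PySem.List.index? cs)).foldl (fun m r => fmpOmin m (some r)) none) := by
  induction l generalizing b with
  | nil => cases b <;> rfl
  | cons e rest ih =>
    rw [List.foldl_cons, List.filterMap_cons]
    cases hidx : PySem.List.index? cs e with
    | none => exact ih b
    | some r =>
      have hstep :
          (match b with
           | none => some r
           | some bb => if r < bb then some r else some bb) = fmpOmin b (some r) := by
        cases b with
        | none => rfl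
        | some bb =>
          simp only [fmpOmin]
          by_cases h : r < bb
          · rw [if_pos h]; congr 1; omega
          · rw [if_neg h]; congr 1; omega
      rw [hstep, ih, List.foldl_cons, fmpFold_start _ (fmpOmin none (some r)), ← fmpOmin_assoc]
      rfl

-- a fold containing rank 0 returns rank 0
theorem fmpFold_zero (xs : List Nat) (h : 0 ∈ xs) :
    xs.foldl (fun m r => fmpOmin m (some r)) none = some 0 := by
  induction xs with
  | nil => cases h
  | cons x xs ih =>
    rw [List.foldl_cons, fmpFold_start]
    rcases List.mem_cons.mp h with h0 | h0
    · subst h0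
      cases xs.foldl (fun m r => fmpOmin m (some r)) none <;>
        simp [fmpOmin]
    · rw [ih h0]; simp [fmpOmin]

-- shifting every rank by one shifts the min by one
theorem fmpFold_succ (xs : List Nat) :
    (xs.map (· + 1)).foldl (fun m r => fmpOmin m (some r)) none
      = (xs.foldl (fun m r => fmpOmin m (some r)) none).map (· + 1) := by
  induction xs with
  | nil => rfl
  | cons x xs ih =>
    rw [List.map_cons, List.foldl_cons, List.foldl_cons, fmpFold_start, fmpFold_start xs, ih]
    cases xs.foldl (fun m r => fmpOmin m (some r)) none with
    | none => rfl
    | some m => simp only [fmpOmin, Option.map_some]; congr 1; omega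

-- the min rank over the matched corpus picks out the first candidate present in it
theorem fmpMin_find (cs l : List String) :
    ((l.filterMap (PySem.List.index? cs)).foldl (fun m r => fmpOmin m (some r)) none).bind
        (fun b => PySem.List.pyGet? cs (b : Int))
      = cs.find? (fun c => PySem.Set.contains l c) := by
  induction cs with
  | nil =>
    have : l.filterMap (PySem.List.index? ([] : List String)) = [] := by
      simp [PySem.List.index?_eq_idxOf?]
    rw [this]; rfl
  | cons c cs ih =>
    by_cases hc : PySem.Set.contains l c = true
    · -- c itself is an existing id: rank 0 is present, min is 0, candidates[0] = c
      have hmem : c ∈ l := (PySem.Set.contains_iff l c).mp hc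
      have h0 : (0 : Nat) ∈ l.filterMap (PySem.List.index? (c :: cs)) :=
        List.mem_filterMap.mpr ⟨c, hmem, PySem.List.index?_cons_self c cs⟩
      rw [fmpFold_zero _ h0, List.find?_cons_of_pos hc]
      simp
    · -- c matches nothing: all ranks shift from cs by one
      have hnot : c ∉ l := fun h => hc ((PySem.Set.contains_iff l c).mpr h)
      have hcongr : l.filterMap (PySem.List.index? (c :: cs))
          = (l.filterMap (PySem.List.index? cs)).map (· + 1) := by
        rw [List.map_filterMap]
        apply List.filterMap_congr
        intro e he
        have hne : c ≠ e := fun h => hnot (h ▸ he)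
        exact PySem.List.index?_cons_of_ne cs hne
      rw [hcongr, fmpFold_succ, List.find?_cons_of_neg hc, ← ih]
      cases (l.filterMap (PySem.List.index? cs)).foldl (fun m r => fmpOmin m (some r)) none with
      | none => rfl
      | some m =>
        simp only [Option.map_some, Option.bind_some]
        have : ((m + 1 : Nat) : Int) = (m : Int) + 1 := by push_cast; ring
        rw [this, PySem.List.pyGet?_cons_succ]

-- ===== VERDICT (by name: the statement is the Claim_ definition above) =====
theorem find_matching_provider_spec : Claim_equal_find_matching_provider := by
  intro bank_id existing_ids _
  unfold Spec_find_matching_provider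
  rw [fmpA_find]
  simp only [find_matching_provider_alt]
  rw [fmpFold_min]
  have hnone : ∀ x : Option Nat, fmpOmin none x = x := fun x => rfl
  rw [hnone, fmpMin_find]
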